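-- pv_equiv track=rewrite | github.com/Cprecona/AyED1-2024-TPs-Precona | TP03/Ejercicio 3.2.py | cargar_matriz_e
-- ===== SOURCE A (Python) =====
-- def cargar_matriz_e(matriz: list[list]) -> list[list]:
--     '''Recibe una matriz y la carga con números de la siguiente manera:
--     Alterna 0 con números del 1 al doble del len de la matriz.
--
--     Pre: ingresar una matriz.
--
--     Post: devuelve la matriz cargada.
--     '''
--     n = len(matriz)
--     primer_numero = 1
--     for i in range(n):
--         for j in range(n):
--             if i%2 == 0 and j%2 !=0:
--                 matriz[i][j] = primer_numero
--                 primer_numero +=1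
--             else:
--                 if i%2 != 0 and j%2 ==0:
--                     matriz[i][j] = primer_numero
--                     primer_numero +=1
--
--     return matriz
-- ===== SOURCE B (Python) =====
-- def cargar_matriz_e(matriz: list[list]) -> list[list]:
--     '''Closed-form fill: same checkerboard cells, values computed directly
--     from (i, j) instead of a running counter.'''
--     n = len(matriz)
--     half = n // 2          # qualifying cells per even row
--     ohalf = (n + 1) // 2   # qualifying cells per odd row
--     for i in range(n):
--         prefix = (i + 1) // 2 * half + i // 2 * ohalf
--         row = matriz[i]
--         if i % 2 == 0:
--             for k in range(half):
--                 row[2 * k + 1] = prefix + k + 1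
--         else:
--             for k in range(ohalf):
--                 row[2 * k] = prefix + k + 1
--     return matriz
-- ===== Notes on version B (the rewrite author's own statement) =====
-- stated objective: alternative
-- what changed: Replaced A's sequentially-incremented counter over a full n x n scan with a direct closed-form value per checkerboard cell: a strided loop over only the written cells, each value computed from (i,k) by a prefix formula, removing the running-state dependency.
import Mathlib
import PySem

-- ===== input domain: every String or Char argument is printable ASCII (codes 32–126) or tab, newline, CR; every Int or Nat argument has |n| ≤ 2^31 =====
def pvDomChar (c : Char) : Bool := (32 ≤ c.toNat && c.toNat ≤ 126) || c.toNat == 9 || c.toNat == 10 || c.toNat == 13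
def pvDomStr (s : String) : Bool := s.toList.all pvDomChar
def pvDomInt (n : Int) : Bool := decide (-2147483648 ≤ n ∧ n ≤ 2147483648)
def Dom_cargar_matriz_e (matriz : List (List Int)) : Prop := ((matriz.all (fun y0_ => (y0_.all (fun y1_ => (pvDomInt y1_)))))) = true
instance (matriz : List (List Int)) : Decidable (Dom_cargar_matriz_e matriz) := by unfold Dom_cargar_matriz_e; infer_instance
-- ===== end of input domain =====

-- B replaces A's running counter with a closed-form value per cell (alternative decomposition);
-- both Pythons mutate `matriz` in place identically — the equivalence proved here is about the return value.

-- ===== PORT A =====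
-- matriz[i][j] = v is ported with List.modify/List.set, which are exact for in-range
-- indices; Pre_cargar_matriz_e guarantees every written index is in range (else Python raises IndexError).
def cargar_matriz_e (matriz : List (List Int)) : List (List Int) :=
  let n := matriz.length
  ((List.range n).foldl (fun (st : List (List Int) × Int) i =>
    (List.range n).foldl (fun (st : List (List Int) × Int) j =>
      if i % 2 == 0 && j % 2 != 0 then
        (st.1.modify i (fun row => row.set j st.2), st.2 + 1)
      else
        if i % 2 != 0 && j % 2 == 0 then
          (st.1.modify i (fun row => row.set j st.2), st.2 + 1)
        else st) st) (matriz, (1 : Int))).1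

-- ===== PORT B =====
def cargar_matriz_e_alt (matriz : List (List Int)) : List (List Int) :=
  let n := matriz.length
  let half := n / 2
  let ohalf := (n + 1) / 2
  (List.range n).foldl (fun m i =>
    let pfx := (i + 1) / 2 * half + i / 2 * ohalf
    if i % 2 == 0 then
      m.modify i (fun row =>
        (List.range half).foldl (fun r k => r.set (2 * k + 1) ((pfx : Int) + (k : Int) + 1)) row)
    else
      m.modify i (fun row =>
        (List.range ohalf).foldl (fun r k => r.set (2 * k) ((pfx : Int) + (k : Int) + 1)) row)) matriz

-- ===== PRECONDITION & SPEC =====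
-- Minimum row length Python A (and B) needs so that no matriz[i][j] write raises IndexError:
-- the largest written column in row i is n-1 when (i+n) is even, n-2 when odd; no writes if n ≤ 1.
def pvReqLen (n i : Nat) : Nat := if n ≤ 1 then 0 else if (i + n) % 2 == 0 then n else n - 1

-- Pre_ holds exactly on the inputs where Python A returns normally (no IndexError).
def Pre_cargar_matriz_e (matriz : List (List Int)) : Prop :=
  ∀ p ∈ matriz.zipIdx, pvReqLen matriz.length p.2 ≤ p.1.length
instance (matriz : List (List Int)) : Decidable (Pre_cargar_matriz_e matriz) := by
  unfold Pre_cargar_matriz_e; infer_instance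

def pvWitness_cargar_matriz_e : List (List Int) := [[0, 0, 0], [0, 0, 0], [0, 0, 0]]

def Spec_cargar_matriz_e (matriz : List (List Int)) (out : List (List Int)) : Prop := out = cargar_matriz_e_alt matriz
instance (matriz : List (List Int)) (out : List (List Int)) : Decidable (Spec_cargar_matriz_e matriz out) := by unfold Spec_cargar_matriz_e; infer_instance

-- ===== CLAIM (what is proved, stated in full; the proofs are below) =====
def Claim_equal_cargar_matriz_e : Prop := ∀ (matriz : List (List Int)), Dom_cargar_matriz_e matriz → Pre_cargar_matriz_e matriz → Spec_cargar_matriz_e matriz (cargar_matriz_e matriz)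

-- ===== LEMMAS AND PROOFS =====

-- number of written ("qualifying") cells in row i among columns < t
def qrow (t i : Nat) : Nat := if i % 2 == 0 then t / 2 else (t + 1) / 2

-- column offset of row i's first written cell
def roff (i : Nat) : Nat := if i % 2 == 0 then 1 else 0

-- canonical per-row fill: k-th written cell of row i gets value c + k
def fillRow (q o : Nat) (c : Int) (row : List Int) : List Int :=
  (List.range q).foldl (fun r k => r.set (2 * k + o) (c + (k : Int))) row

-- total written cells in rows < i (each full row of width n)
def sumq (n i : Nat) : Nat := ((List.range i).map (qrow n)).sum

theorem sumq_succ (n i : Nat) : sumq n (i + 1) = sumq n i + qrow n i := by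
  simp [sumq, List.range_succ]

theorem sumq_closed (n i : Nat) :
    sumq n i = (i + 1) / 2 * (n / 2) + i / 2 * ((n + 1) / 2) := by
  induction i with
  | zero => simp [sumq]
  | succ i ih =>
    rw [sumq_succ, ih]
    obtain ⟨a, ha | ha⟩ := Nat.even_or_odd' i <;> subst ha
    · have h1 : (2 * a + 1) / 2 = a := by omega
      have h2 : (2 * a + 1 + 1) / 2 = a + 1 := by omega
      have h3 : 2 * a / 2 = a := by omega
      have h4 : qrow n (2 * a) = n / 2 := by
        unfold qrow; simp [Nat.mul_mod_right]
      rw [h1, h2, h3, h4]; ring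
    · have h1 : (2 * a + 1 + 1) / 2 = a + 1 := by omega
      have h2 : (2 * a + 1 + 1 + 1) / 2 = a + 1 := by omega
      have h3 : (2 * a + 1) / 2 = a := by omega
      have h4 : qrow n (2 * a + 1) = (n + 1) / 2 := by
        unfold qrow
        have : ¬ ((2 * a + 1) % 2 == 0) = true := by simp; try omega
        rw [if_neg this]
      rw [h1, h2, h3, h4]; ring

theorem inner_lift (t i : Nat) (m : List (List Int)) (c : Int) :
    (List.range t).foldl (fun (st : List (List Int) × Int) j =>
      if i % 2 == 0 && j % 2 != 0 then
        (st.1.modify i (fun row => row.set j st.2), st.2 + 1)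
      else
        if i % 2 != 0 && j % 2 == 0 then
          (st.1.modify i (fun row => row.set j st.2), st.2 + 1)
        else st) (m, c)
    = (m.modify i (fillRow (qrow t i) (roff i) c), c + (qrow t i : Int)) := by
  induction t with
  | zero =>
    have h0 : qrow 0 i = 0 := by unfold qrow; split <;> simp
    have hfill : fillRow 0 (roff i) c = id := by funext row; simp [fillRow]
    simp [h0, hfill, List.modify_id]
  | succ t ih =>
    rw [List.range_succ, List.foldl_append, ih]
    simp only [List.foldl_cons, List.foldl_nil]
    obtain ⟨a, ha | ha⟩ := Nat.even_or_odd' i <;>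
      obtain ⟨b, hb | hb⟩ := Nat.even_or_odd' t <;> subst ha <;> subst hb
    · -- i even, t even: no write at column t
      have hq : qrow (2 * b + 1) (2 * a) = qrow (2 * b) (2 * a) := by
        unfold qrow; simp [Nat.mul_mod_right]; omega
      rw [if_neg (by simp), hq, if_neg (by simp)]
    · -- i even, t odd: write at column t = 2*b+1
      have h1 : (2 * a % 2 == 0 && (2 * b + 1) % 2 != 0) = true := by simp; try omega
      rw [if_pos h1]
      have hq : qrow (2 * b + 1 + 1) (2 * a) = qrow (2 * b + 1) (2 * a) + 1 := by
        unfold qrow; simp [Nat.mul_mod_right]; omega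
      have hcol : 2 * qrow (2 * b + 1) (2 * a) + roff (2 * a) = 2 * b + 1 := by
        unfold qrow roff; simp [Nat.mul_mod_right]; omega
      rw [List.modify_modify_eq, hq]
      simp only [Prod.mk.injEq]
      refine ⟨?_, by push_cast; ring⟩
      congr 1
      funext row
      simp only [Function.comp, fillRow, List.range_succ, List.foldl_append,
        List.foldl_cons, List.foldl_nil, hcol]
    · -- i odd, t even: write at column t = 2*b
      have h2 : ((2 * a + 1) % 2 != 0 && 2 * b % 2 == 0) = true := by simp; try omega
      rw [if_neg (by simp), if_pos h2]
      have hq : qrow (2 * b + 1) (2 * a + 1) = qrow (2 * b) (2 * a + 1) + 1 := by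
        unfold qrow
        have : ¬ ((2 * a + 1) % 2 == 0) = true := by simp; try omega
        rw [if_neg this, if_neg this]; omega
      have hcol : 2 * qrow (2 * b) (2 * a + 1) + roff (2 * a + 1) = 2 * b := by
        unfold qrow roff
        have : ¬ ((2 * a + 1) % 2 == 0) = true := by simp; try omega
        rw [if_neg this, if_neg this]; omega
      rw [List.modify_modify_eq, hq]
      simp only [Prod.mk.injEq]
      refine ⟨?_, by push_cast; ring⟩
      congr 1
      funext row
      simp only [Function.comp, fillRow, List.range_succ, List.foldl_append,
        List.foldl_cons, List.foldl_nil, hcol]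
    · -- i odd, t odd: no write
      have hq : qrow (2 * b + 1 + 1) (2 * a + 1) = qrow (2 * b + 1) (2 * a + 1) := by
        unfold qrow
        have : ¬ ((2 * a + 1) % 2 == 0) = true := by simp; try omega
        rw [if_neg this, if_neg this]; omega
      rw [if_neg (by simp), if_neg (by simp; try omega), hq]

theorem outer_lift (n : Nat) (matriz : List (List Int)) (t : Nat) :
    (List.range t).foldl (fun (st : List (List Int) × Int) i =>
      (List.range n).foldl (fun (st : List (List Int) × Int) j =>
        if i % 2 == 0 && j % 2 != 0 then
          (st.1.modify i (fun row => row.set j st.2), st.2 + 1)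
        else
          if i % 2 != 0 && j % 2 == 0 then
            (st.1.modify i (fun row => row.set j st.2), st.2 + 1)
          else st) st) (matriz, (1 : Int))
    = ((List.range t).foldl (fun m i =>
        m.modify i (fillRow (qrow n i) (roff i) (1 + (sumq n i : Int)))) matriz,
       1 + (sumq n t : Int)) := by
  induction t with
  | zero => simp [sumq]
  | succ t ih =>
    rw [List.range_succ, List.foldl_append, List.foldl_append, ih]
    simp only [List.foldl_cons, List.foldl_nil]
    rw [inner_lift]
    simp only [Prod.mk.injEq]
    exact ⟨trivial, by rw [sumq_succ]; push_cast; ring⟩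

-- ===== VERDICT (by name: the statement is the Claim_ definition above) =====
theorem cargar_matriz_e_spec : Claim_equal_cargar_matriz_e := by
  intro matriz _ _
  unfold Spec_cargar_matriz_e cargar_matriz_e cargar_matriz_e_alt
  simp only
  rw [outer_lift matriz.length matriz matriz.length]
  refine List.foldl_ext _ _ _ ?_
  intro m i _
  obtain ⟨a, ha | ha⟩ := Nat.even_or_odd' i <;> subst ha
  · have he : (2 * a % 2 == 0) = true := by simp
    rw [if_pos he]
    unfold fillRow qrow roff
    rw [if_pos he, if_pos he]
    congr 1
    funext row
    refine List.foldl_ext _ _ _ ?_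
    intro r k _
    congr 1
    rw [sumq_closed]
    push_cast
    ring
  · rw [if_neg (by simp; try omega)]
    unfold fillRow qrow roff
    rw [if_neg (by simp; try omega), if_neg (by simp; try omega)]
    congr 1
    funext row
    refine List.foldl_ext _ _ _ ?_
    intro r k _
    congr 1
    rw [sumq_closed]
    push_cast
    ring
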